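-- pv_equiv track=rewrite | github.com/xiasma/evagene-integration-examples | research-cohort-anonymiser/python/src/research_anonymiser/anonymiser.py | _build_stable_identifiers
-- ===== SOURCE A (Python) =====
-- from collections.abc import Mapping
-- from typing import Any
--
-- def _build_stable_identifiers(
--     labels: Mapping[str, str],
--     individuals: list[dict[str, Any]],
-- ) -> dict[str, str]:
--     by_label: dict[str, list[str]] = {}
--     for individual in individuals:
--         individual_id = individual["id"]
--         by_label.setdefault(labels[individual_id], []).append(individual_id)
--     identifiers: dict[str, str] = {}
--     for label, ids in by_label.items():
--         for index, individual_id in enumerate(sorted(ids), start=1):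
--             identifiers[individual_id] = f"{label}-{index}"
--     return identifiers
-- ===== SOURCE B (Python) =====
-- def _build_stable_identifiers(labels, individuals):
--     ids = [individual["id"] for individual in individuals]
--     identifiers = {}
--     for label in dict.fromkeys(labels[i] for i in ids):
--         matching = sorted(i for i in ids if labels[i] == label)
--         for index, individual_id in enumerate(matching, start=1):
--             identifiers[individual_id] = f"{label}-{index}"
--     return identifiers
-- ===== Notes on version B (the rewrite author's own statement) =====
-- stated objective: alternative
-- what changed: A builds a dict of per-label id lists in one grouping pass and then iterates its items; B never groups: it deduplicates the label sequence once (dict.fromkeys) and, per distinct label, filters the id list and enumerates its sorted matches directly.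
import Mathlib
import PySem

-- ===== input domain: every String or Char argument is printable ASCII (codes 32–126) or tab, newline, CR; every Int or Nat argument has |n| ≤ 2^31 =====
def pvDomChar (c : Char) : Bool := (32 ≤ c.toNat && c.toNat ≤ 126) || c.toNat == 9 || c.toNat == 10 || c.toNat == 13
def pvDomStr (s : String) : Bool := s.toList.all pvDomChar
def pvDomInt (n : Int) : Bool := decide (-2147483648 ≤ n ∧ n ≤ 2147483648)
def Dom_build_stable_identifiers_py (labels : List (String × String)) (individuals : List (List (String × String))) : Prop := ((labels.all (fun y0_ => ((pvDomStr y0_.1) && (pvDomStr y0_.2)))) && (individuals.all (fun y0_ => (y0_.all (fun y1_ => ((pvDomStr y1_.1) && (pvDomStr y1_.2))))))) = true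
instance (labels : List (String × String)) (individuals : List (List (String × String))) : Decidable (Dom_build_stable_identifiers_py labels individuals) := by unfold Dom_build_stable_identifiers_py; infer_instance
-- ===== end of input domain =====

-- B replaces A's group-into-a-dict-of-lists pass by deduplicating the label sequence once and
-- filtering the id list per label (same return value, different decomposition; objective: alternative).

-- ===== PORT A =====
def build_stable_identifiers_py (labels : List (String × String)) (individuals : List (List (String × String))) : List (String × String) :=
  -- by_label.setdefault(lab, []).append(i)  is  d.modify lab [] (· ++ [i])
  let by_label : PySem.Dict String (List String) :=
    individuals.foldl (fun d individual =>
      let individual_id := (PySem.Dict.ofList individual).getD "id" ""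
      d.modify ((PySem.Dict.ofList labels).getD individual_id "") [] (· ++ [individual_id]))
      PySem.Dict.empty
  let identifiers : PySem.Dict String String :=
    by_label.items.foldl (fun ids p =>
      (PySem.List.enumerate (PySem.List.sorted p.2 (fun x => x) false) 1).foldl
        (fun ids q => ids.insert q.2 (p.1 ++ "-" ++ PySem.Int.toStr q.1)) ids)
      PySem.Dict.empty
  identifiers.items

-- ===== PORT B =====
def build_stable_identifiers_py_alt (labels : List (String × String)) (individuals : List (List (String × String))) : List (String × String) :=
  let ids := individuals.map (fun individual => (PySem.Dict.ofList individual).getD "id" "")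
  let identifiers : PySem.Dict String String :=
    (PySem.List.dedup (ids.map (fun i => (PySem.Dict.ofList labels).getD i ""))).foldl
      (fun acc label =>
        let matching := PySem.List.sorted
          (ids.filter (fun i => (PySem.Dict.ofList labels).getD i "" == label)) (fun x => x) false
        (PySem.List.enumerate matching 1).foldl
          (fun acc q => acc.insert q.2 (label ++ "-" ++ PySem.Int.toStr q.1)) acc)
      PySem.Dict.empty
  identifiers.items

-- ===== PRECONDITION & SPEC =====
-- Pre_ excludes exactly the inputs on which the Python raises KeyError: an individual without an
-- "id" key, or an individual whose id is not a key of labels.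
def Pre_build_stable_identifiers_py (labels : List (String × String)) (individuals : List (List (String × String))) : Prop :=
  individuals.all (fun individual =>
    ((PySem.Dict.ofList individual).get? "id").any
      (fun i => (PySem.Dict.ofList labels).contains i)) = true
instance (labels : List (String × String)) (individuals : List (List (String × String))) : Decidable (Pre_build_stable_identifiers_py labels individuals) := by unfold Pre_build_stable_identifiers_py; infer_instance

def pvWitness_build_stable_identifiers_py : (List (String × String)) × (List (List (String × String))) :=
  ([("a1", "X"), ("b2", "X"), ("c3", "Y")],
   [[("id", "b2")], [("id", "a1")], [("id", "c3")], [("id", "a1")]])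

def Spec_build_stable_identifiers_py (labels : List (String × String)) (individuals : List (List (String × String))) (out : List (String × String)) : Prop := out = build_stable_identifiers_py_alt labels individuals
instance (labels : List (String × String)) (individuals : List (List (String × String))) (out : List (String × String)) : Decidable (Spec_build_stable_identifiers_py labels individuals out) := by unfold Spec_build_stable_identifiers_py; infer_instance

-- ===== CLAIM (what is proved, stated in full; the proofs are below) =====
def Claim_equal_build_stable_identifiers_py : Prop := ∀ (labels : List (String × String)) (individuals : List (List (String × String))), Dom_build_stable_identifiers_py labels individuals → Pre_build_stable_identifiers_py labels individuals → Spec_build_stable_identifiers_py labels individuals (build_stable_identifiers_py labels individuals)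

-- ===== LEMMAS AND PROOFS =====

theorem pvWitness_ok : Dom_build_stable_identifiers_py pvWitness_build_stable_identifiers_py.1 pvWitness_build_stable_identifiers_py.2 ∧ Pre_build_stable_identifiers_py pvWitness_build_stable_identifiers_py.1 pvWitness_build_stable_identifiers_py.2 := by decide

-- A's grouping dict, characterised: its items are the deduplicated label sequence, each label
-- paired with the ids carrying that label, in original order.
theorem by_label_items (labelOf : String → String) (ids : List String) :
    (ids.foldl (fun d i => d.modify (labelOf i) [] (· ++ [i])) (PySem.Dict.empty : PySem.Dict String (List String))).items
      = (PySem.List.dedup (ids.map labelOf)).map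
          (fun lab => (lab, ids.filter (fun i => labelOf i == lab))) := by
  have hnd := PySem.Dict.nodup_keys_foldl_modify_key ids labelOf [] (fun _ i => (· ++ [i]))
    PySem.Dict.empty (by simp [pysem])
  rw [PySem.Dict.items_eq_map_keys _ hnd []]
  rw [PySem.Dict.keys_foldl_modify_key ids labelOf [] (fun _ i => (· ++ [i])) PySem.Dict.empty]
  have hupd : PySem.Set.update ((PySem.Dict.empty : PySem.Dict String (List String)).keys) (ids.map labelOf)
      = PySem.List.dedup (ids.map labelOf) := by
    simp [pysem, PySem.Set.update, PySem.Set.ofList_eq_foldl]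
  rw [hupd]
  apply List.map_congr_left
  intro lab _
  have h := PySem.Dict.getD_foldl_modify_append (ids.map (fun i => (labelOf i, i)))
    (PySem.Dict.empty : PySem.Dict String (List String)) lab
  rw [List.foldl_map] at h
  simp only [List.filter_map, List.map_map] at h
  simp only [h, pysem]
  simp [Function.comp_def]

-- ===== VERDICT (by name: the statement is the Claim_ definition above) =====
theorem build_stable_identifiers_py_spec : Claim_equal_build_stable_identifiers_py := by
  intro labels individuals _ _
  unfold Spec_build_stable_identifiers_py build_stable_identifiers_py build_stable_identifiers_py_alt
  simp only []
  have h1 : individuals.foldl (fun d individual =>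
      let individual_id := (PySem.Dict.ofList individual).getD "id" ""
      d.modify ((PySem.Dict.ofList labels).getD individual_id "") [] (· ++ [individual_id]))
      (PySem.Dict.empty : PySem.Dict String (List String))
      = (individuals.map (fun individual => (PySem.Dict.ofList individual).getD "id" "")).foldl
          (fun d i => d.modify ((PySem.Dict.ofList labels).getD i "") [] (· ++ [i])) PySem.Dict.empty := by
    rw [List.foldl_map]
  rw [h1, by_label_items (fun i => (PySem.Dict.ofList labels).getD i "")
        (individuals.map (fun individual => (PySem.Dict.ofList individual).getD "id" ""))]
  rw [List.foldl_map]
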